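-- pv_equiv track=rewrite | github.com/geekdojo-io/programming-challenges | teamcode/fall_2018_cgs/advanced_problem_set/6_hedge_maze_stdin.py | solve
-- ===== SOURCE A (Python) =====
-- def solve(n, ar):
--     # Cound the number of consecutive hedges vertically
--     res = [0]*n
--
--     for col in range(n):
--         prev = ar[0][col]
--         cnt = 1 if prev == 'X' else 0
--         for row in range(1, n): # Travel vergically
--             cur = ar[row][col]
--             if cur == 'X' and prev != 'X':
--                 cnt += 1
--             prev = cur
--         res[col] = cnt
--
--     return min(res)
-- ===== SOURCE B (Python) =====
-- def _run_heads(xs):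
--     """First element of each maximal run of consecutive equal elements."""
--     heads = []
--     i = 0
--     m = len(xs)
--     while i < m:
--         v = xs[i]
--         heads.append(v)
--         i += 1
--         while i < m and xs[i] == v:
--             i += 1
--     return heads
--
--
-- def solve(n, ar):
--     # Per column: materialize the column, group consecutive equal cells,
--     # count the groups whose value is 'X'; answer is the minimum over columns.
--     counts = []
--     for c in range(n):
--         column = [ar[r][c] for r in range(n)]
--         counts.append(_run_heads(column).count('X'))
--     return min(counts)
-- ===== Notes on version B (the rewrite author's own statement) =====
-- stated objective: alternative
-- what changed: Replaces the stateful prev-flag scan writing into a preallocated result array with a group-consecutive decomposition: each column is materialized, split into maximal runs of equal cells, and the runs headed by 'X' are counted; the minimum of the per-column counts is returned.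
import Mathlib
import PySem

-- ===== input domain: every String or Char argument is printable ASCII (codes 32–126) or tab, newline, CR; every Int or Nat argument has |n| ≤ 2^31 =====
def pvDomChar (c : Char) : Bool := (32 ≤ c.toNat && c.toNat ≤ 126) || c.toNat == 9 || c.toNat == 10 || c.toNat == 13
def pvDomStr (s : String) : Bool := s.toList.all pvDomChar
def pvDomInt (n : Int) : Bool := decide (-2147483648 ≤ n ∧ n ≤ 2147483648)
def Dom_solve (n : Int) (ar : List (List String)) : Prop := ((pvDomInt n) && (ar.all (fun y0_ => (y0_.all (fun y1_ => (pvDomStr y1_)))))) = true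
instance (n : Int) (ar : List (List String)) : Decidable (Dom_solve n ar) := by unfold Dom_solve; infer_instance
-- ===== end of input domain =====

-- B replaces A's prev-flag scan into a preallocated array by a group-consecutive
-- decomposition per column (alternative decomposition; same cost).

-- ===== PORT A =====
def solve (n : Int) (ar : List (List String)) : Int :=
  -- res = [0]*n
  let res : List Int := PySem.List.pyRepeat [(0 : Int)] n
  -- for col in range(n): … ; res[col] = cnt
  let res := (PySem.List.pyRange 0 n 1).foldl (fun res col =>
    let prev := PySem.List.pyGetD (PySem.List.pyGetD ar 0 []) col ""
    let cnt : Int := if prev = "X" then 1 else 0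
    let pc := (PySem.List.pyRange 1 n 1).foldl (fun (pc : String × Int) row =>
      let cur := PySem.List.pyGetD (PySem.List.pyGetD ar row []) col ""
      (cur, if cur = "X" ∧ pc.1 ≠ "X" then pc.2 + 1 else pc.2)) (prev, cnt)
    PySem.List.pySetD res col pc.2) res
  (PySem.List.min? res (fun x => x)).getD 0

-- ===== PORT B =====
-- heads of the maximal runs of consecutive equal elements (Source B's _run_heads)
def runHeads : List String → List String
  | [] => []
  | x :: xs => x :: runHeads (xs.dropWhile (· == x))
termination_by xs => xs.length
decreasing_by
  exact Nat.lt_succ_of_le (List.length_dropWhile_le _ _)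

def solve_alt (n : Int) (ar : List (List String)) : Int :=
  let counts := (PySem.List.pyRange 0 n 1).map (fun c =>
    let column := (PySem.List.pyRange 0 n 1).map (fun r =>
      PySem.List.pyGetD (PySem.List.pyGetD ar r []) c "")
    (PySem.List.count (runHeads column) "X" : Int))
  (PySem.List.min? counts (fun x => x)).getD 0

-- ===== PRECONDITION & SPEC =====
-- Pre_: exactly where Python A returns: n ≥ 1 (min([]) raises ValueError for n ≤ 0),
-- at least n rows, and each of the first n rows has at least n cells (else IndexError).
def Pre_solve (n : Int) (ar : List (List String)) : Prop :=
  1 ≤ n ∧ n ≤ (ar.length : Int) ∧ ∀ row ∈ ar.take n.toNat, n ≤ (row.length : Int)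
instance (n : Int) (ar : List (List String)) : Decidable (Pre_solve n ar) := by unfold Pre_solve; infer_instance

def pvWitness_solve : Int × List (List String) := (2, [["X", "."], [".", "X"]])

def Spec_solve (n : Int) (ar : List (List String)) (out : Int) : Prop := out = solve_alt n ar
instance (n : Int) (ar : List (List String)) (out : Int) : Decidable (Spec_solve n ar out) := by unfold Spec_solve; infer_instance

-- ===== CLAIM (what is proved, stated in full; the proofs are below) =====
def Claim_equal_solve : Prop := ∀ (n : Int) (ar : List (List String)), Dom_solve n ar → Pre_solve n ar → Spec_solve n ar (solve n ar)

-- ===== LEMMAS AND PROOFS =====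

-- A's inner-loop transition count, as a function of the previous cell and the rest of the column
def transCount : String → List String → Int
  | _, [] => 0
  | prev, x :: xs => (if x = "X" ∧ prev ≠ "X" then 1 else 0) + transCount x xs

-- A's inner loop over row indices computes transCount of the mapped column tail
lemma foldl_transCount (g : Int → String) (l : List Int) : ∀ (prev : String) (cnt : Int),
    (l.foldl (fun (pc : String × Int) row =>
      (g row, if g row = "X" ∧ pc.1 ≠ "X" then pc.2 + 1 else pc.2)) (prev, cnt)).2
    = cnt + transCount prev (l.map g) := by
  induction l with
  | nil => intro prev cnt; simp [transCount]
  | cons x xs ih =>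
      intro prev cnt
      simp only [List.foldl_cons, List.map_cons, transCount, ih]
      split_ifs <;> ring

-- dropping a leading run of a non-"X" value does not change the number of "X"-runs
lemma runHeads_dropWhile_nonX (x : String) (hx : x ≠ "X") (ys : List String) :
    (runHeads (ys.dropWhile (· == x))).count "X" = (runHeads ys).count "X" := by
  cases ys with
  | nil => simp
  | cons y t =>
      by_cases hy : y = x
      · subst hy
        simp [runHeads, hx]
      · simp [hy]

-- the transition count equals the number of "X"-headed runs
lemma transCount_runHeads (xs : List String) :
    (∀ prev, prev ≠ "X" → transCount prev xs = ((runHeads xs).count "X" : Int)) ∧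
      transCount "X" xs = ((runHeads (xs.dropWhile (· == "X"))).count "X" : Int) := by
  induction xs with
  | nil => exact ⟨fun _ _ => by simp [transCount, runHeads], by simp [transCount, runHeads]⟩
  | cons x t ih =>
      constructor
      · intro prev hprev
        by_cases hx : x = "X"
        · subst hx
          simp [transCount, hprev, runHeads, ih.2]
          ring
        · simp [transCount, hx, runHeads, ih.1 x hx,
            runHeads_dropWhile_nonX x hx t]
      · by_cases hx : x = "X"
        · subst hx
          simp [transCount, ih.2]
        · simp [transCount, hx, runHeads,
            ih.1 x hx, runHeads_dropWhile_nonX x hx t]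

lemma take_set (l : List Int) (m : Nat) (v : Int) : (l.set m v).take m = l.take m := by
  induction l generalizing m with
  | nil => simp
  | cons x t ih =>
      cases m with
      | zero => simp
      | succ k => simp [List.set, List.take, ih]

lemma take_set_succ (l : List Int) (m : Nat) (v : Int) (h : m < l.length) :
    (l.set m v).take (m + 1) = l.take m ++ [v] := by
  rw [List.take_add_one, List.getElem?_set_self h, take_set]
  simp

-- the write-into-a-preallocated-array loop is a map over the index range
lemma setloop (f : Int → Int) (b : Int) : ∀ (k : Nat) (a : Int) (res : List Int),
    a + k = b → 0 ≤ a → res.length = b.toNat →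
    (PySem.List.pyRange a b 1).foldl (fun r c => PySem.List.pySetD r c (f c)) res
      = res.take a.toNat ++ (PySem.List.pyRange a b 1).map f := by
  intro k
  induction k with
  | zero =>
      intro a res hab ha hlen
      have hba : b ≤ a := by omega
      rw [PySem.List.pyRange_one_eq_nil hba]
      simp [List.take_of_length_le, show res.length ≤ a.toNat by omega]
  | succ k ih =>
      intro a res hab ha hlen
      have hlt : a < b := by omega
      rw [PySem.List.pyRange_one_cons hlt]
      simp only [List.foldl_cons, List.map_cons]
      rw [PySem.List.pySetD_of_nonneg _ _ ha,
        ih (a + 1) (res.set a.toNat (f a)) (by omega) (by omega) (by simpa using hlen)]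
      have hm : a.toNat < res.length := by omega
      have h1 : (a + 1).toNat = a.toNat + 1 := by omega
      rw [h1, take_set_succ res a.toNat (f a) hm]
      simp

-- per-column equality of A's scan and B's run-head count
lemma colcount (n : Int) (ar : List (List String)) (hn : 1 ≤ n) (c : Int) :
    (let prev := PySem.List.pyGetD (PySem.List.pyGetD ar 0 []) c ""
     let cnt : Int := if prev = "X" then 1 else 0
     ((PySem.List.pyRange 1 n 1).foldl (fun (pc : String × Int) row =>
       (PySem.List.pyGetD (PySem.List.pyGetD ar row []) c "",
        if PySem.List.pyGetD (PySem.List.pyGetD ar row []) c "" = "X" ∧ pc.1 ≠ "X"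
        then pc.2 + 1 else pc.2)) (prev, cnt)).2)
    = PySem.List.count (runHeads ((PySem.List.pyRange 0 n 1).map
        (fun r => PySem.List.pyGetD (PySem.List.pyGetD ar r []) c ""))) "X" := by
  have hcons : PySem.List.pyRange 0 n 1 = 0 :: PySem.List.pyRange 1 n 1 :=
    PySem.List.pyRange_one_cons (by omega)
  set g : Int → String := fun r => PySem.List.pyGetD (PySem.List.pyGetD ar r []) c "" with hg
  rw [hcons]
  simp only [List.map_cons]
  rw [foldl_transCount g (PySem.List.pyRange 1 n 1)]
  rw [PySem.List.count_eq]
  set p := g 0 with hp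
  set tail := (PySem.List.pyRange 1 n 1).map g with htail
  have hp0 : PySem.List.pyGetD (PySem.List.pyGetD ar 0 []) c "" = p := rfl
  rw [hp0]
  by_cases hpx : p = "X"
  · rw [hpx, if_pos rfl, (transCount_runHeads tail).2]
    simp [runHeads]
    ring
  · rw [if_neg hpx, (transCount_runHeads tail).1 p hpx,
      ← runHeads_dropWhile_nonX p hpx tail]
    simp [runHeads, hpx]

-- ===== VERDICT (by name: the statement is the Claim_ definition above) =====
theorem solve_spec : Claim_equal_solve := by
  intro n ar _ hpre
  obtain ⟨hn, -, -⟩ := hpre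
  simp only [Spec_solve, solve, solve_alt]
  have hlen : (PySem.List.pyRepeat [(0 : Int)] n).length = n.toNat := by
    rw [PySem.List.pyRepeat_singleton]; simp
  rw [setloop (fun col =>
      ((PySem.List.pyRange 1 n 1).foldl (fun (pc : String × Int) row =>
         (PySem.List.pyGetD (PySem.List.pyGetD ar row []) col "",
          if PySem.List.pyGetD (PySem.List.pyGetD ar row []) col "" = "X" ∧ pc.1 ≠ "X"
          then pc.2 + 1 else pc.2))
        (PySem.List.pyGetD (PySem.List.pyGetD ar 0 []) col "",
         if PySem.List.pyGetD (PySem.List.pyGetD ar 0 []) col "" = "X" then (1 : Int) else 0)).2)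
    n n.toNat 0 _ (by omega) (by omega) hlen]
  simp only [Int.toNat_zero, List.take_zero, List.nil_append]
  have hmaps := List.map_congr_left (l := PySem.List.pyRange 0 n 1)
    (fun c _ => colcount n ar hn c)
  rw [hmaps]
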